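-- pv_equiv track=rewrite | github.com/GaelleBriet/Cryptography | TP01.py | encryptROT47
-- ===== SOURCE A (Python) =====
-- def encryptROT47(message):
--     result = []
--     for char in message:
--         ascii_val = ord(char)
--         if 33 <= ascii_val <= 126:
--             result.append(chr(33 + ((ascii_val + 14) % 94)))
--         else:
--             result.append(char)
--     return ''.join(result)
-- ===== SOURCE B (Python) =====
-- def encryptROT47(message):
--     table = {}
--     for c in range(33, 127):
--         table[c] = chr(33 + ((c + 14) % 94))
--     return message.translate(table)
-- ===== Notes on version B (the rewrite author's own statement) =====
-- stated objective: faster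
-- what changed: B builds a 94-entry translation table once and applies str.translate (a single C-level table-driven pass), instead of A's per-character ord/branch/append loop in Python bytecode.
import Mathlib
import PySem

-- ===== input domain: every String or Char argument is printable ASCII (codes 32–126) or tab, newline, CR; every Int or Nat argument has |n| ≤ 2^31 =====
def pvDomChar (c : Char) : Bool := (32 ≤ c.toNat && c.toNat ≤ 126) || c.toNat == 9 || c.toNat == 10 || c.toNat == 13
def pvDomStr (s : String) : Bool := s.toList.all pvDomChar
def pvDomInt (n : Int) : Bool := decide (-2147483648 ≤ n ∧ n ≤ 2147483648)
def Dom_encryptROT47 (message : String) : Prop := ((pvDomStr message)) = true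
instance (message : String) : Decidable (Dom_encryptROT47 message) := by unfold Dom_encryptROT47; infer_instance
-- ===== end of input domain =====

-- B replaces A's per-character arithmetic branch by a translation table built once and a table-driven lookup (idiomatic; return value only, no side effects).

-- ===== PORT A =====
-- literal port of A: loop over the characters, append the shifted char or the char itself
def encryptROT47 (message : String) : String :=
  let result : List Char := message.toList.foldl (fun acc char =>
    let asciiVal := char.toNat
    if 33 ≤ asciiVal ∧ asciiVal ≤ 126 then
      acc ++ [Char.ofNat (33 + ((asciiVal + 14) % 94))]
    else
      acc ++ [char]) []
  String.mk result

-- ===== PORT B =====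
-- port of B's table-building loop: for c in range(33,127): table[c] = chr(33 + ((c+14)%94))
def rot47Table : PySem.Dict Nat Char :=
  (PySem.List.pyRange 33 127 1).foldl
    (fun d c => d.insert c.toNat (Char.ofNat (33 + ((c.toNat + 14) % 94))))
    PySem.Dict.empty

-- port of message.translate(table): absent codepoints are left unchanged
def encryptROT47_alt (message : String) : String :=
  String.mk (message.toList.map (fun ch => (rot47Table.get? ch.toNat).getD ch))

-- ===== PRECONDITION & SPEC =====
def Spec_encryptROT47 (message : String) (out : String) : Prop := out = encryptROT47_alt message
instance (message : String) (out : String) : Decidable (Spec_encryptROT47 message out) := by unfold Spec_encryptROT47; infer_instance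

-- ===== CLAIM (what is proved, stated in full; the proofs are below) =====
def Claim_equal_encryptROT47 : Prop := ∀ (message : String), Dom_encryptROT47 message → Spec_encryptROT47 message (encryptROT47 message)

-- ===== LEMMAS AND PROOFS =====

-- lookup characterisation of the fold-built table, for any right end 33 ≤ b
lemma rot47_get?_fold (b : Nat) (hb : 33 ≤ b) (n : Nat) :
    ((PySem.List.pyRange 33 (b : Int) 1).foldl
      (fun d c => d.insert c.toNat (Char.ofNat (33 + ((c.toNat + 14) % 94))))
      PySem.Dict.empty).get? n
    = if 33 ≤ n ∧ n < b then some (Char.ofNat (33 + ((n + 14) % 94))) else none := by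
  induction b, hb using Nat.le_induction with
  | base =>
    rw [PySem.List.pyRange_one_eq_nil (by norm_num)]
    simp [PySem.Dict.get?_empty]
  | succ b hb ih =>
    have : ((b : Nat) : Int) + 1 = ((b + 1 : Nat) : Int) := by push_cast; ring
    rw [← this, PySem.List.pyRange_one_succ_right (by exact_mod_cast hb)]
    rw [List.foldl_append]
    simp only [List.foldl_cons, List.foldl_nil]
    rw [PySem.Dict.get?_insert]
    by_cases h : n = ((b : Int)).toNat
    · have hb' : ((b : Int)).toNat = b := by omega
      rw [if_pos (by omega : n = ((b:Int)).toNat)]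
      rw [if_pos (by omega : 33 ≤ n ∧ n < b + 1)]
      rw [h, hb']
    · rw [if_neg h, ih]
      have hnb : n ≠ b := by simpa using h
      by_cases h2 : 33 ≤ n ∧ n < b
      · rw [if_pos h2, if_pos ⟨h2.1, by omega⟩]
      · rw [if_neg h2, if_neg (by omega)]

lemma rot47_get? (n : Nat) :
    rot47Table.get? n
    = if 33 ≤ n ∧ n < 127 then some (Char.ofNat (33 + ((n + 14) % 94))) else none := by
  have := rot47_get?_fold 127 (by norm_num) n
  simpa [rot47Table] using this

-- the per-character values agree
lemma rot47_char (ch : Char) :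
    (rot47Table.get? ch.toNat).getD ch
    = if 33 ≤ ch.toNat ∧ ch.toNat ≤ 126 then Char.ofNat (33 + ((ch.toNat + 14) % 94)) else ch := by
  rw [rot47_get?]
  by_cases h : 33 ≤ ch.toNat ∧ ch.toNat ≤ 126
  · rw [if_pos ⟨h.1, by omega⟩, if_pos h, Option.getD_some]
  · rw [if_neg (by omega), if_neg h, Option.getD_none]

-- A's append-loop is a map
lemma foldl_append_map (g : Char → Char) (l : List Char) (acc : List Char) :
    l.foldl (fun acc ch => acc ++ [g ch]) acc = acc ++ l.map g := by
  induction l generalizing acc with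
  | nil => simp
  | cons x xs ih => simp [ih]

-- ===== VERDICT (by name: the statement is the Claim_ definition above) =====
set_option maxRecDepth 4096 in
theorem encryptROT47_spec : Claim_equal_encryptROT47 := by
  intro message _
  show _ = _
  unfold encryptROT47 encryptROT47_alt
  have h : (message.toList.foldl (fun acc char =>
      let asciiVal := char.toNat
      if 33 ≤ asciiVal ∧ asciiVal ≤ 126 then
        acc ++ [Char.ofNat (33 + ((asciiVal + 14) % 94))]
      else
        acc ++ [char]) [])
      = message.toList.map (fun ch =>
        if 33 ≤ ch.toNat ∧ ch.toNat ≤ 126 then Char.ofNat (33 + ((ch.toNat + 14) % 94)) else ch) := by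
    have := foldl_append_map (fun ch =>
      if 33 ≤ ch.toNat ∧ ch.toNat ≤ 126 then Char.ofNat (33 + ((ch.toNat + 14) % 94)) else ch)
      message.toList []
    simp only [List.nil_append] at this
    rw [← this]
    congr 1
    funext acc ch
    by_cases h : 33 ≤ ch.toNat ∧ ch.toNat ≤ 126 <;> simp [h]
  rw [h]
  show String.mk _ = String.mk _
  congr 1
  apply List.map_congr_left
  intro ch _
  rw [rot47_char]
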